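-- pv_equiv track=rewrite | github.com/etigerstudio/segmisty | mm.py | __choose_better_tokenization
-- ===== SOURCE A (Python) =====
-- def __choose_better_tokenization(t1, t2):
--     l1, l2 = len(t1), len(t2)
--     if l1 > l2:
--         return t2
--     elif l1 < l2:
--         return t1
--     else:  # l1 == l2
--         s_count1 = len([None for s in t1 if len(t1) == 1])  # t1中单字词数量
--         s_count2 = len([None for s in t2 if len(t2) == 1])
--         return t1 if s_count1 < s_count2 else t2  # 默认返回后者
-- ===== SOURCE B (Python) =====
-- def __choose_better_tokenization(t1, t2):
--     # In the tie branch A's two counts are always equal (both comprehensions test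
--     # len(t1)==1 / len(t2)==1, constants that coincide when the lengths are equal),
--     # so the tie always yields t2; hence a single closed-form comparison suffices.
--     return t1 if len(t1) < len(t2) else t2
-- ===== Notes on version B (the rewrite author's own statement) =====
-- stated objective: simpler
-- what changed: B replaces A's tie-branch counting loops (two throwaway list comprehensions whose counts are provably always equal) with a single closed-form length comparison; it never iterates over the token lists.
import Mathlib
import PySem

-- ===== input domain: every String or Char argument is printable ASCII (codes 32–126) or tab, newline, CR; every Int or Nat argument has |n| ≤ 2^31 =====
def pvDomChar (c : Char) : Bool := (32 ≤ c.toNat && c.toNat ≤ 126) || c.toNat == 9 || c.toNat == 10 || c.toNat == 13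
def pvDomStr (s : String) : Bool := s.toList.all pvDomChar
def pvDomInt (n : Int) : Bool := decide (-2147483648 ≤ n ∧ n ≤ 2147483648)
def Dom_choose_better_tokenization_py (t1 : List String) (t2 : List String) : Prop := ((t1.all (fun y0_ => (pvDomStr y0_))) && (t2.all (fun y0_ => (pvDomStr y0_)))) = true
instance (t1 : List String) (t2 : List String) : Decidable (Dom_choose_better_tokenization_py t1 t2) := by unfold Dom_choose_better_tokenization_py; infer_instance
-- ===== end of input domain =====

-- ===== PORT A =====
def choose_better_tokenization_py (t1 : List String) (t2 : List String) : List String :=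
  let l1 : Int := t1.length
  let l2 : Int := t2.length
  if l1 > l2 then t2
  else if l1 < l2 then t1
  else
    -- [None for s in t1 if len(t1) == 1] — a list of `none`, then its length
    let s_count1 := (t1.filterMap (fun _ => if l1 == 1 then some (none : Option Unit) else none)).length
    let s_count2 := (t2.filterMap (fun _ => if l2 == 1 then some (none : Option Unit) else none)).length
    if s_count1 < s_count2 then t1 else t2

-- ===== PORT B =====
-- B: single closed-form comparison; A's tie-branch counts are always equal, so ties go to t2.
def choose_better_tokenization_py_alt (t1 : List String) (t2 : List String) : List String :=
  if t1.length < t2.length then t1 else t2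

-- ===== PRECONDITION & SPEC =====
def Spec_choose_better_tokenization_py (t1 : List String) (t2 : List String) (out : List String) : Prop := out = choose_better_tokenization_py_alt t1 t2
instance (t1 : List String) (t2 : List String) (out : List String) : Decidable (Spec_choose_better_tokenization_py t1 t2 out) := by unfold Spec_choose_better_tokenization_py; infer_instance

-- ===== CLAIM (what is proved, stated in full; the proofs are below) =====
def Claim_equal_choose_better_tokenization_py : Prop := ∀ (t1 : List String) (t2 : List String), Dom_choose_better_tokenization_py t1 t2 → Spec_choose_better_tokenization_py t1 t2 (choose_better_tokenization_py t1 t2)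

-- ===== LEMMAS AND PROOFS =====
-- length of a filterMap whose condition is constant over the traversal
def constFilterLen (l : List String) (b : Bool) : Nat :=
  (l.filterMap (fun _ => if b then some (none : Option Unit) else none)).length

theorem constFilterLen_eq (l : List String) (b : Bool) :
    constFilterLen l b = if b then l.length else 0 := by
  induction l with
  | nil => cases b <;> simp [constFilterLen]
  | cons x xs ih => cases b <;> simp_all [constFilterLen, List.filterMap]


-- ===== VERDICT (by name: the statement is the Claim_ definition above) =====
theorem choose_better_tokenization_py_spec : Claim_equal_choose_better_tokenization_py := by
  intro t1 t2 _
  unfold Spec_choose_better_tokenization_py choose_better_tokenization_py choose_better_tokenization_py_alt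
  simp only []
  rcases lt_trichotomy t1.length t2.length with h | h | h
  · have h1 : ¬ ((t1.length : Int) > (t2.length : Int)) := by exact_mod_cast not_lt.mpr h.le
    have h2 : ((t1.length : Int) < (t2.length : Int)) := by exact_mod_cast h
    simp [h1, h2, h]
  · have h1 : ¬ ((t1.length : Int) > (t2.length : Int)) := by omega
    have h2 : ¬ ((t1.length : Int) < (t2.length : Int)) := by omega
    have hb : (((t1.length : Int)) == 1) = (((t2.length : Int)) == 1) := by
      rw [show ((t1.length : Int)) = ((t2.length : Int)) by exact_mod_cast h]
    have hc : constFilterLen t1 ((t1.length : Int) == 1) = constFilterLen t2 ((t2.length : Int) == 1) := by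
      rw [constFilterLen_eq, constFilterLen_eq, hb, h]
    simp only [if_neg h1, if_neg h2]
    show (if constFilterLen t1 ((t1.length : Int) == 1) < constFilterLen t2 ((t2.length : Int) == 1) then t1 else t2) = _
    rw [hc]
    simp [h]
  · have h1 : ((t1.length : Int) > (t2.length : Int)) := by exact_mod_cast h
    simp [h1, not_lt.mpr h.le]
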